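-- pv_equiv track=rewrite | github.com/lulf87/pdf-report-checker | backend/app/services/comparator.py | _parse_clause_number
-- ===== SOURCE A (Python) =====
-- def _parse_clause_number(value: str) -> tuple[int, ...]:
--     """Parse dotted clause number into integer tuple."""
--     parts = []
--     for token in (value or "").split("."):
--         token = token.strip()
--         if not token:
--             continue
--         if not token.isdigit():
--             return tuple()
--         parts.append(int(token))
--     return tuple(parts)
-- ===== SOURCE B (Python) =====
-- def _parse_clause_number(value: str) -> tuple[int, ...]:
--     """Parse dotted clause number into integer tuple."""
--     parts = []
--     buf = ""      # digits of the clause component being read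
--     gap = False   # whitespace seen after those digits (digits must not resume)
--     for ch in (value or "") + ".":
--         if ch == ".":
--             if buf:
--                 parts.append(int(buf))
--             buf = ""
--             gap = False
--         elif "0" <= ch <= "9":
--             if gap:
--                 return tuple()
--             buf += ch
--         elif ch.isspace():
--             if buf:
--                 gap = True
--         else:
--             return tuple()
--     return tuple(parts)
-- ===== Notes on version B (the rewrite author's own statement) =====
-- stated objective: alternative
-- what changed: Replaces the token pipeline (split on dots, strip each token, isdigit check, int conversion) by a single character-level state machine that scans the string once, accumulating each component's digit buffer with a gap flag and committing a component at every dot.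
import Mathlib
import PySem

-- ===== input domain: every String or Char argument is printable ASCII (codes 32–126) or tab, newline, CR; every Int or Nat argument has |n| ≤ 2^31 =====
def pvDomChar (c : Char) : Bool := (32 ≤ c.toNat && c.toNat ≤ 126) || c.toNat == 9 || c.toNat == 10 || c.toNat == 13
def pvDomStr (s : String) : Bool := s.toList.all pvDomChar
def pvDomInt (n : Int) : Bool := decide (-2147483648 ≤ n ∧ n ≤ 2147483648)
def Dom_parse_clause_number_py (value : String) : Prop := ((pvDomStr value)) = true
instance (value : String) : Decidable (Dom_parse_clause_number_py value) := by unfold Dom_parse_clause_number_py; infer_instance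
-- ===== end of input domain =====

-- B replaces A's token pipeline (split on dots, strip, isdigit check, int) by a
-- single character-level state machine over the string (digit buffer + gap flag,
-- committing a component at each dot); objective: alternative.

-- ===== PORT A =====
-- loop over tokens carrying the accumulator `parts`; early `return tuple()` = result []
def parse_clause_number_py_loop : List String → List Int → List Int
  | [], parts => parts
  | t :: rest, parts =>
    let token := PySem.Str.strip t
    if token = "" then parse_clause_number_py_loop rest parts
    else if !(PySem.Str.strIsdigit token) then []
    else parse_clause_number_py_loop rest (parts ++ [(PySem.Int.ofStr? token).getD 0])
    -- int(token): exact here, since the loop only reaches it on a nonempty digit token,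
    -- where Python's int() returns and ofStr? is `some`.

def parse_clause_number_py (value : String) : List Int :=
  -- `value or ""` is the identity on strings up to the split result
  parse_clause_number_py_loop ((PySem.Str.split? value ".").getD []) []

-- ===== PORT B =====
-- the state machine of Source B: state = (parts, buf, gap); early `return tuple()` = []
def parse_clause_number_py_alt_go : List Char → List Int → List Char → Bool → List Int
  | [], parts, _buf, _gap => parts
  | c :: rest, parts, buf, gap =>
    if c = '.' then
      parse_clause_number_py_alt_go rest
        (if buf ≠ [] then parts ++ [(PySem.Int.ofChars? buf).getD 0] else parts) [] false
        -- int(buf): exact here, buf is nonempty and holds only '0'..'9' characters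
    else if PySem.Chars.isdigit c then      -- "0" <= ch <= "9"
      (if gap then [] else parse_clause_number_py_alt_go rest parts (buf ++ [c]) gap)
    else if PySem.Chars.isspace c then
      parse_clause_number_py_alt_go rest parts buf (if buf ≠ [] then true else gap)
    else []

def parse_clause_number_py_alt (value : String) : List Int :=
  -- for ch in (value or "") + ".":   (`value or ""` is the identity on the chars)
  parse_clause_number_py_alt_go (value.toList ++ ['.']) [] [] false

-- ===== PRECONDITION & SPEC =====
def Spec_parse_clause_number_py (value : String) (out : List Int) : Prop := out = parse_clause_number_py_alt value
instance (value : String) (out : List Int) : Decidable (Spec_parse_clause_number_py value out) := by unfold Spec_parse_clause_number_py; infer_instance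

-- ===== CLAIM (what is proved, stated in full; the proofs are below) =====
def Claim_equal_parse_clause_number_py : Prop := ∀ (value : String), Dom_parse_clause_number_py value → Spec_parse_clause_number_py value (parse_clause_number_py value)

-- ===== LEMMAS AND PROOFS =====

-- proof-side reference: split at '.', head segment and remaining segments
def pvSplit1 : List Char → List Char × List (List Char)
  | [] => ([], [])
  | c :: rest =>
    let p := pvSplit1 rest
    if c = '.' then ([], p.1 :: p.2) else (c :: p.1, p.2)

-- proof-side reference: B's automaton restricted to one dot-free segment
def pvSegRun : List Char → List Char → Bool → Option (List Char)
  | [], buf, _gap => some buf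
  | c :: cs, buf, gap =>
    if PySem.Chars.isdigit c then
      (if gap then none else pvSegRun cs (buf ++ [c]) gap)
    else if PySem.Chars.isspace c then
      pvSegRun cs buf (if buf ≠ [] then true else gap)
    else none

def pvCommit (parts : List Int) (buf : List Char) : List Int :=
  if buf ≠ [] then parts ++ [(PySem.Int.ofChars? buf).getD 0] else parts

def pvProcSegs : List (List Char) → List Int → List Int
  | [], parts => parts
  | seg :: rest, parts =>
    match pvSegRun seg [] false with
    | none => []
    | some buf => pvProcSegs rest (pvCommit parts buf)

theorem pv_digit_not_space (c : Char) (h : PySem.Chars.isdigit c = true) :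
    PySem.Chars.isspace c = false := by
  simp only [PySem.Chars.isdigit, Bool.and_eq_true, decide_eq_true_eq] at h
  obtain ⟨h1, h2⟩ := h
  have l1 : 48 ≤ c.toNat := h1
  have l2 : c.toNat ≤ 57 := h2
  simp only [PySem.Chars.isspace]
  simp only [Bool.or_eq_false_iff, Bool.and_eq_false_iff, decide_eq_false_iff_not]
  omega

theorem pv_head?_dropWhile (p : Char → Bool) (l : List Char) (c : Char) (cs : List Char)
    (h : l.dropWhile p = c :: cs) : p c = false := by
  induction l with
  | nil => simp at h
  | cons a l ih =>
    by_cases hp : p a = true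
    · rw [List.dropWhile_cons_of_pos hp] at h; exact ih h
    · rw [List.dropWhile_cons_of_neg (by simp [hp])] at h
      cases h; simpa using hp

-- rstrip drops nothing from an all-digit list
theorem pv_rstrip_digits (d : List Char) (h : d.all PySem.Chars.isdigit = true) :
    PySem.Chars.rstrip d = d := by
  unfold PySem.Chars.rstrip
  have : d.reverse.dropWhile PySem.Chars.isspace = d.reverse := by
    cases hrev : d.reverse with
    | nil => simp
    | cons a t =>
      have ha : a ∈ d := by
        have : a ∈ d.reverse := by rw [hrev]; simp
        simpa using this
      rw [List.dropWhile_cons_of_neg]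
      simp [pv_digit_not_space a ((List.all_eq_true.mp h) a ha)]
  rw [this, List.reverse_reverse]

-- rstrip of (digits ++ tail): the digits stay, rstrip acts on the tail
theorem pv_rstrip_append (d r : List Char) (hd : d.all PySem.Chars.isdigit = true) :
    PySem.Chars.rstrip (d ++ r) =
      if PySem.Chars.rstrip r = [] then d else d ++ PySem.Chars.rstrip r := by
  by_cases hr : PySem.Chars.rstrip r = []
  · rw [if_pos hr]
    have hrall : r.reverse.dropWhile PySem.Chars.isspace = [] := by
      have h0 := hr
      unfold PySem.Chars.rstrip at h0
      simpa using h0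
    unfold PySem.Chars.rstrip
    rw [List.reverse_append, List.dropWhile_append, hrall]
    simp only [List.isEmpty_nil, if_true]
    have h1 := pv_rstrip_digits d hd
    unfold PySem.Chars.rstrip at h1
    exact h1
  · rw [if_neg hr]
    have hrne : r.reverse.dropWhile PySem.Chars.isspace ≠ [] := by
      intro h0
      apply hr
      unfold PySem.Chars.rstrip
      rw [h0]
      rfl
    unfold PySem.Chars.rstrip
    rw [List.reverse_append, List.dropWhile_append]
    rw [if_neg (by simpa [List.isEmpty_iff] using hrne)]
    simp

-- rstrip is [] iff the list is all whitespace
theorem pv_rstrip_eq_nil_iff (l : List Char) :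
    PySem.Chars.rstrip l = [] ↔ l.all PySem.Chars.isspace = true := by
  unfold PySem.Chars.rstrip
  rw [List.reverse_eq_nil_iff, List.dropWhile_eq_nil_iff]
  simp [List.all_eq_true]

-- rstrip is a prefix, so a nonempty rstrip keeps the head
theorem pv_rstrip_head (l : List Char) (c : Char) (cs : List Char)
    (h : PySem.Chars.rstrip l = c :: cs) : ∃ t, l = c :: t := by
  have hpre : PySem.Chars.rstrip l <+: l := by
    unfold PySem.Chars.rstrip
    have := List.dropWhile_suffix (l := l.reverse) PySem.Chars.isspace
    have h2 := List.reverse_prefix.mpr this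
    simpa using h2
  rcases hpre with ⟨t, ht⟩
  rw [h] at ht
  exact ⟨cs ++ t, by simpa using ht.symm⟩

-- W1: the automaton accepts pure whitespace, keeping the buffer
theorem pvSegRun_all_space (seg : List Char) (buf : List Char) (gap : Bool)
    (h : seg.all PySem.Chars.isspace = true) : pvSegRun seg buf gap = some buf := by
  induction seg generalizing buf gap with
  | nil => rfl
  | cons c cs ih =>
    rw [List.all_cons, Bool.and_eq_true] at h
    have hnd : PySem.Chars.isdigit c = false := by
      cases hdc : PySem.Chars.isdigit c with
      | false => rfl
      | true =>
        rw [pv_digit_not_space c hdc] at h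
        exact absurd h.1 (by simp)
    simp only [pvSegRun, hnd, h.1, Bool.false_eq_true, if_false, if_true]
    exact ih _ _ h.2

-- W2: with the gap flag set, any further non-space content fails
theorem pvSegRun_gap (seg : List Char) (buf : List Char)
    (h : ¬ seg.all PySem.Chars.isspace = true) : pvSegRun seg buf true = none := by
  induction seg generalizing buf with
  | nil => simp at h
  | cons c cs ih =>
    by_cases hs : PySem.Chars.isspace c = true
    · have hnd : PySem.Chars.isdigit c = false := by
        cases hdc : PySem.Chars.isdigit c with
        | false => rfl
        | true =>
          rw [pv_digit_not_space c hdc] at hs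
          exact absurd hs (by simp)
      have hcs : ¬ cs.all PySem.Chars.isspace = true := by
        intro hall
        exact h (by simp [List.all_cons, hs, hall])
      simp only [pvSegRun, hnd, hs, Bool.false_eq_true, if_false, if_true]
      rw [ite_self]
      exact ih _ hcs
    · by_cases hd : PySem.Chars.isdigit c = true
      · simp [pvSegRun, hd]
      · simp [pvSegRun, hd, hs]

-- W3: mid-number (nonempty buffer, no gap): digits may continue, then only whitespace
theorem pvSegRun_midnum (seg : List Char) (buf : List Char) (hbuf : buf ≠ []) :
    pvSegRun seg buf false =
      if (seg.dropWhile PySem.Chars.isdigit).all PySem.Chars.isspace then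
        some (buf ++ seg.takeWhile PySem.Chars.isdigit)
      else none := by
  induction seg generalizing buf with
  | nil => simp [pvSegRun]
  | cons c cs ih =>
    by_cases hd : PySem.Chars.isdigit c = true
    · rw [List.dropWhile_cons_of_pos hd, List.takeWhile_cons_of_pos hd]
      simp only [pvSegRun, hd, if_true, Bool.false_eq_true, if_false]
      rw [ih (buf ++ [c]) (by simp)]
      split <;> simp
    · rw [List.dropWhile_cons_of_neg (by simp [hd]), List.takeWhile_cons_of_neg (by simp [hd])]
      by_cases hs : PySem.Chars.isspace c = true
      · simp only [pvSegRun, hd, hs, Bool.false_eq_true, if_false, if_true, hbuf, ne_eq,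
          not_false_iff]
        by_cases hall : cs.all PySem.Chars.isspace = true
        · rw [pvSegRun_all_space cs buf true hall]
          simp [List.all_cons, hs, hall]
        · rw [pvSegRun_gap cs buf hall]
          simp [List.all_cons, hall]
      · simp [pvSegRun, hd, hs, List.all_cons]

-- W4: from the fresh state the automaton demands  ws* digits* ws*
theorem pvSegRun_fresh (seg : List Char) :
    pvSegRun seg [] false =
      if ((seg.dropWhile PySem.Chars.isspace).dropWhile PySem.Chars.isdigit).all
          PySem.Chars.isspace then
        some ((seg.dropWhile PySem.Chars.isspace).takeWhile PySem.Chars.isdigit)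
      else none := by
  induction seg with
  | nil => simp [pvSegRun]
  | cons c cs ih =>
    by_cases hd : PySem.Chars.isdigit c = true
    · have hs : PySem.Chars.isspace c = false := pv_digit_not_space c hd
      rw [List.dropWhile_cons_of_neg (by simp [hs])]
      rw [List.dropWhile_cons_of_pos hd, List.takeWhile_cons_of_pos hd]
      simp only [pvSegRun, hd, if_true, Bool.false_eq_true, if_false, List.nil_append]
      rw [pvSegRun_midnum cs [c] (by simp)]
      split <;> simp
    · by_cases hs : PySem.Chars.isspace c = true
      · rw [List.dropWhile_cons_of_pos hs]
        simp only [pvSegRun, hd, hs, Bool.false_eq_true, if_false, if_true]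
        simpa using ih
      · rw [List.dropWhile_cons_of_neg (by simp [hs])]
        rw [List.dropWhile_cons_of_neg (by simp [hd])]
        simp [pvSegRun, hd, List.all_cons, hs]

-- SEG: the automaton on one dot-free segment = strip + all-digits test
theorem pvSegRun_eq_strip (seg : List Char) :
    pvSegRun seg [] false =
      if PySem.Chars.strip seg = [] ∨ PySem.Chars.strIsdigit (PySem.Chars.strip seg) = true then
        some (PySem.Chars.strip seg)
      else none := by
  rw [pvSegRun_fresh]
  have hstrip : PySem.Chars.strip seg =
      PySem.Chars.rstrip (seg.dropWhile PySem.Chars.isspace) := by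
    simp [PySem.Chars.strip, PySem.Chars.lstrip]
  set s := seg.dropWhile PySem.Chars.isspace with hs
  set d := s.takeWhile PySem.Chars.isdigit with hdd
  set r := s.dropWhile PySem.Chars.isdigit with hrr
  have hdr : d ++ r = s := List.takeWhile_append_dropWhile
  have hd_all : d.all PySem.Chars.isdigit = true := by
    rw [List.all_eq_true]; intro x hx; exact List.mem_takeWhile_imp (by rw [← hdd]; exact hx)
  have hsplit : PySem.Chars.strip seg =
      if PySem.Chars.rstrip r = [] then d else d ++ PySem.Chars.rstrip r := by
    rw [hstrip, ← hdr, pv_rstrip_append d r hd_all]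
  by_cases hall : r.all PySem.Chars.isspace = true
  · -- valid: strip seg = d, which is empty or all digits
    have hr0 : PySem.Chars.rstrip r = [] := (pv_rstrip_eq_nil_iff r).mpr hall
    have hstrip_d : PySem.Chars.strip seg = d := by rw [hsplit, if_pos hr0]
    rw [if_pos hall, hstrip_d]
    by_cases hd0 : d = []
    · simp [hd0]
    · rw [if_pos (Or.inr (by simp [PySem.Chars.strIsdigit, hd0, hd_all]))]
  · -- invalid: strip seg is nonempty and contains the non-digit head of r
    have hr0 : PySem.Chars.rstrip r ≠ [] := by
      intro h0; exact hall ((pv_rstrip_eq_nil_iff r).mp h0)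
    have hstrip_dr : PySem.Chars.strip seg = d ++ PySem.Chars.rstrip r := by
      rw [hsplit, if_neg hr0]
    rw [if_neg hall]
    obtain ⟨c, cs, hcons⟩ := List.exists_cons_of_ne_nil hr0
    have hrc : ∃ t, r = c :: t := pv_rstrip_head r c cs hcons
    obtain ⟨t, ht⟩ := hrc
    have hcnd : PySem.Chars.isdigit c = false := pv_head?_dropWhile _ s c t (by rw [← hrr, ht])
    have hne : ¬ (PySem.Chars.strip seg = [] ∨
        PySem.Chars.strIsdigit (PySem.Chars.strip seg) = true) := by
      rintro (h1 | h2)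
      · rw [hstrip_dr, hcons] at h1; simp at h1
      · rw [hstrip_dr, hcons] at h2
        simp only [PySem.Chars.strIsdigit, Bool.and_eq_true] at h2
        have hcd := (List.all_eq_true.mp h2.2) c (by simp)
        rw [hcnd] at hcd
        cases hcd
    rw [if_neg hne]

-- A's token loop over the segments = the reference segment processor
theorem pvProcSegs_cons (seg : List Char) (rest : List (List Char)) (parts : List Int) :
    pvProcSegs (seg :: rest) parts =
      if PySem.Chars.strip seg = [] then pvProcSegs rest parts
      else if PySem.Chars.strIsdigit (PySem.Chars.strip seg) then
        pvProcSegs rest (parts ++ [(PySem.Int.ofChars? (PySem.Chars.strip seg)).getD 0])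
      else [] := by
  simp only [pvProcSegs]
  rw [pvSegRun_eq_strip seg]
  by_cases h0 : PySem.Chars.strip seg = []
  · rw [if_pos (Or.inl h0), if_pos h0]
    simp [pvCommit, h0]
  · rw [if_neg h0]
    by_cases hall : PySem.Chars.strIsdigit (PySem.Chars.strip seg) = true
    · rw [if_pos (Or.inr hall), if_pos hall]
      simp [pvCommit, h0]
    · rw [if_neg (by simp [h0, hall]), if_neg hall]

theorem pv_loop_eq_procSegs (segs : List (List Char)) (parts : List Int) :
    parse_clause_number_py_loop (segs.map String.ofList) parts = pvProcSegs segs parts := by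
  induction segs generalizing parts with
  | nil => rfl
  | cons seg rest ih =>
    rw [pvProcSegs_cons]
    simp only [List.map_cons, parse_clause_number_py_loop]
    have htok : (PySem.Str.strip (String.ofList seg)).toList = PySem.Chars.strip seg := by simp
    have hemp : (PySem.Str.strip (String.ofList seg) = "") ↔ PySem.Chars.strip seg = [] := by
      rw [String.ext_iff, htok]; simp
    have hdig : PySem.Str.strIsdigit (PySem.Str.strip (String.ofList seg)) =
        PySem.Chars.strIsdigit (PySem.Chars.strip seg) := by simp
    have hint : PySem.Int.ofStr? (PySem.Str.strip (String.ofList seg)) =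
        PySem.Int.ofChars? (PySem.Chars.strip seg) := by simp [PySem.Int.ofStr?]
    by_cases h0 : PySem.Chars.strip seg = []
    · rw [if_pos (hemp.mpr h0), if_pos h0]
      exact ih parts
    · rw [if_neg (fun hc => h0 (hemp.mp hc)), if_neg h0]
      by_cases hall : PySem.Chars.strIsdigit (PySem.Chars.strip seg) = true
      · rw [hdig, hall, hint, ih]
        simp
      · rw [hdig, if_neg hall]
        have : PySem.Chars.strIsdigit (PySem.Chars.strip seg) = false := by
          cases hq : PySem.Chars.strIsdigit (PySem.Chars.strip seg)
          · rfl
          · exact absurd hq hall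
        rw [this]
        simp

-- B's whole-string automaton = the reference segment processor on pvSplit1
theorem pv_auto_eq (l : List Char) (parts : List Int) (buf : List Char) (gap : Bool) :
    parse_clause_number_py_alt_go (l ++ ['.']) parts buf gap =
      (match pvSegRun (pvSplit1 l).1 buf gap with
       | none => []
       | some buf' => pvProcSegs (pvSplit1 l).2 (pvCommit parts buf')) := by
  induction l generalizing parts buf gap with
  | nil =>
    simp only [List.nil_append, pvSplit1, pvSegRun]
    by_cases hb : buf = [] <;>
      simp [parse_clause_number_py_alt_go, pvCommit, pvProcSegs, hb]
  | cons c rest ih =>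
    by_cases hdot : c = '.'
    · subst hdot
      simp only [List.cons_append, parse_clause_number_py_alt_go]
      rw [ih]
      simp only [pvSplit1]
      rfl
    · simp only [List.cons_append, parse_clause_number_py_alt_go, if_neg hdot]
      simp only [pvSplit1, if_neg hdot]
      by_cases hd : PySem.Chars.isdigit c = true
      · simp only [hd, if_true, pvSegRun]
        cases gap with
        | true => simp
        | false =>
          simp only [Bool.false_eq_true, if_false]
          rw [ih]
      · by_cases hs : PySem.Chars.isspace c = true
        · simp only [hd, hs, Bool.false_eq_true, if_false, if_true, pvSegRun]
          rw [ih]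
        · simp [hd, hs, pvSegRun]

-- splitOn with separator "." computes pvSplit1 (fuel characterisation of splitOn.go)
theorem pv_splitOn_go (l : List Char) (fuel : Nat) (cur : List Char)
    (acc : List (List Char)) (hfuel : l.length < fuel) :
    PySem.Chars.splitOn.go ['.'] fuel l cur acc =
      acc.reverse ++ (cur.reverse ++ (pvSplit1 l).1) :: (pvSplit1 l).2 := by
  induction l generalizing fuel cur acc with
  | nil =>
    cases fuel with
    | zero => omega
    | succ m => simp [PySem.Chars.splitOn.go, pvSplit1]
  | cons c rest ih =>
    cases fuel with
    | zero => omega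
    | succ m =>
      by_cases hdot : c = '.'
      · subst hdot
        rw [show PySem.Chars.splitOn.go ['.'] (m + 1) ('.' :: rest) cur acc =
            PySem.Chars.splitOn.go ['.'] m rest [] (cur.reverse :: acc) by
          simp [PySem.Chars.splitOn.go, List.isPrefixOf]]
        rw [ih m [] _ (by simpa using hfuel)]
        simp [pvSplit1]
      · rw [show PySem.Chars.splitOn.go ['.'] (m + 1) (c :: rest) cur acc =
            PySem.Chars.splitOn.go ['.'] m rest (c :: cur) acc by
          simp [PySem.Chars.splitOn.go, List.isPrefixOf]
          exact fun h => absurd h.symm hdot]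
        rw [ih m (c :: cur) _ (by simpa using hfuel)]
        simp [pvSplit1, hdot]

theorem pv_splitOn_eq (l : List Char) :
    PySem.Chars.splitOn l ['.'] = (pvSplit1 l).1 :: (pvSplit1 l).2 := by
  unfold PySem.Chars.splitOn
  rw [pv_splitOn_go l (l.length + 1) [] [] (by omega)]
  simp

-- ===== VERDICT (by name: the statement is the Claim_ definition above) =====
theorem parse_clause_number_py_spec : Claim_equal_parse_clause_number_py := by
  intro value _
  unfold Spec_parse_clause_number_py parse_clause_number_py parse_clause_number_py_alt
  have hsplit : (PySem.Str.split? value ".").getD [] =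
      ((pvSplit1 value.toList).1 :: (pvSplit1 value.toList).2).map String.ofList := by
    simp [PySem.Str.split?, PySem.Chars.split?, pv_splitOn_eq]
  rw [hsplit, pv_loop_eq_procSegs, pv_auto_eq]
  simp only [pvProcSegs]
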